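-- pv_equiv track=rewrite | github.com/starkcoffee/maths | maths/sqroot/sqroot.py | _getHighestHundredth
-- ===== SOURCE A (Python) =====
-- def _getHighestHundredth(n):
--   units = n%100
--   power = 0
--   n = n // 100
--   while n > 0:
--     units = n%100
--     power = power + 1
--     n = n // 100
--
--   return units, power
-- ===== SOURCE B (Python) =====
-- def _getHighestHundredth(n):
--   q = n // 100
--   if q <= 0:
--     return n % 100, 0
--   units, power = _getHighestHundredth(q)
--   return units, power + 1
-- ===== Notes on version B (the rewrite author's own statement) =====
-- stated objective: simpler
-- what changed: Replaces A's while loop with its mutating units/power/n state by a direct structural recursion on n // 100 that returns (n % 100, 0) at the base and bumps the power on the way out, dropping the in-loop units accumulator.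
import Mathlib
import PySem

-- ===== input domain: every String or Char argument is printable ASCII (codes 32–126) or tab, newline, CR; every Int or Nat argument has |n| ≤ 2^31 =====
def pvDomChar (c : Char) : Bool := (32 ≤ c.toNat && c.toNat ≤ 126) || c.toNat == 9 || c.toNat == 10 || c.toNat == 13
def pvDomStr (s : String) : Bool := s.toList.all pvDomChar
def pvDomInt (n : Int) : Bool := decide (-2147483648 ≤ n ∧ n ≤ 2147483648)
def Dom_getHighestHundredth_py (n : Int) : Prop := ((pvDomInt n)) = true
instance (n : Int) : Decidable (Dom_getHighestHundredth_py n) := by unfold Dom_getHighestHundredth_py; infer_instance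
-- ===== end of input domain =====

-- B replaces A's while loop (mutating units/power/n) by a structural recursion on n // 100; objective: simpler.

theorem pvFloordiv_toNat_lt (n : Int) (h : 0 < n) :
    (PySem.Int.floordiv n 100).toNat < n.toNat := by
  rw [PySem.Int.floordiv_eq_ediv_of_pos (by norm_num)]
  omega

theorem pvFloordiv_pos_src (n : Int) (h : 0 < PySem.Int.floordiv n 100) : 0 < n := by
  rw [PySem.Int.floordiv_eq_ediv_of_pos (by norm_num)] at h
  omega

-- ===== PORT A =====
-- the while loop of A, state (units, power, n)
def getHighestHundredth_loop (units power n : Int) : Int × Int :=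
  if 0 < n then
    getHighestHundredth_loop (PySem.Int.mod n 100) (power + 1) (PySem.Int.floordiv n 100)
  else
    (units, power)
termination_by n.toNat
decreasing_by exact pvFloordiv_toNat_lt n (by assumption)

def getHighestHundredth_py (n : Int) : Int × Int :=
  getHighestHundredth_loop (PySem.Int.mod n 100) 0 (PySem.Int.floordiv n 100)

-- ===== PORT B =====
def getHighestHundredth_py_alt (n : Int) : Int × Int :=
  let q := PySem.Int.floordiv n 100
  if h : q ≤ 0 then
    (PySem.Int.mod n 100, 0)
  else
    let up := getHighestHundredth_py_alt q
    (up.1, up.2 + 1)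
termination_by n.toNat
decreasing_by exact pvFloordiv_toNat_lt n (pvFloordiv_pos_src n (by omega))

-- ===== PRECONDITION & SPEC =====
def Spec_getHighestHundredth_py (n : Int) (out : Int × Int) : Prop := out = getHighestHundredth_py_alt n
instance (n : Int) (out : Int × Int) : Decidable (Spec_getHighestHundredth_py n out) := by unfold Spec_getHighestHundredth_py; infer_instance

-- ===== CLAIM (what is proved, stated in full; the proofs are below) =====
def Claim_equal_getHighestHundredth_py : Prop := ∀ (n : Int), Dom_getHighestHundredth_py n → Spec_getHighestHundredth_py n (getHighestHundredth_py n)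

-- ===== LEMMAS AND PROOFS =====

-- A's loop started at (n % 100, p, n // 100) returns B's units and adds B's power to p.
theorem loop_eq_alt (n p : Int) :
    getHighestHundredth_loop (PySem.Int.mod n 100) p (PySem.Int.floordiv n 100)
      = ((getHighestHundredth_py_alt n).1, p + (getHighestHundredth_py_alt n).2) := by
  generalize hm : n.toNat = m
  induction m using Nat.strong_induction_on generalizing n p with
  | _ m ih =>
    rw [getHighestHundredth_loop, getHighestHundredth_py_alt]
    by_cases h : PySem.Int.floordiv n 100 ≤ 0
    · rw [if_neg (by omega), dif_pos h]
      simp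
    · rw [if_pos (by omega), dif_neg h]
      subst hm
      rw [ih _ (pvFloordiv_toNat_lt n (pvFloordiv_pos_src n (by omega))) _ _ rfl]
      simp
      ring

-- ===== VERDICT (by name: the statement is the Claim_ definition above) =====
theorem getHighestHundredth_py_spec : Claim_equal_getHighestHundredth_py := by
  intro n _
  unfold Spec_getHighestHundredth_py getHighestHundredth_py
  rw [loop_eq_alt]
  simp
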